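-- pv_equiv track=rewrite | github.com/yuen1996/stock_fundamental_dashboard | stock_fundamental_dashboard/pages/11_AI_Analyst.py | _prune_bundle
-- ===== SOURCE A (Python) =====
-- from typing import Any, Dict, List, Optional
--
-- def _prune_bundle(catalog: List[Dict[str,Any]], focus: List[str], cap: int) -> List[Dict[str,Any]]:
--     if not catalog:
--         return []
--     if focus:
--         order = {name: idx for idx, name in enumerate(focus)}
--         pri = [c for c in catalog if c.get("name") in focus]
--         pri.sort(key=lambda c: order.get(c.get("name"), len(order)))
--         rest = [c for c in catalog if c.get("name") not in focus]
--         return (pri + rest)[:cap]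
--     return catalog[:cap]
-- ===== SOURCE B (Python) =====
-- def _prune_bundle(catalog, focus, cap):
--     # One stable sort over the whole catalog: focus items get their focus index
--     # as key, everything else the sentinel len(focus) (> any index), so sort
--     # stability keeps non-focus items in original order after the focus ones.
--     order = {name: idx for idx, name in enumerate(focus)}
--     sentinel = len(focus)
--     return sorted(catalog, key=lambda c: order.get(c.get("name"), sentinel))[:cap]
-- ===== Notes on version B (the rewrite author's own statement) =====
-- stated objective: simpler
-- what changed: A partitions the catalog into focus/non-focus lists via repeated 'name in focus' list scans, sorts only the focus part and concatenates; B does one stable sort of the whole catalog with a sentinel key (len(focus)) from a single dict lookup, relying on sort stability to reproduce the partition, then slices.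
import Mathlib
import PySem

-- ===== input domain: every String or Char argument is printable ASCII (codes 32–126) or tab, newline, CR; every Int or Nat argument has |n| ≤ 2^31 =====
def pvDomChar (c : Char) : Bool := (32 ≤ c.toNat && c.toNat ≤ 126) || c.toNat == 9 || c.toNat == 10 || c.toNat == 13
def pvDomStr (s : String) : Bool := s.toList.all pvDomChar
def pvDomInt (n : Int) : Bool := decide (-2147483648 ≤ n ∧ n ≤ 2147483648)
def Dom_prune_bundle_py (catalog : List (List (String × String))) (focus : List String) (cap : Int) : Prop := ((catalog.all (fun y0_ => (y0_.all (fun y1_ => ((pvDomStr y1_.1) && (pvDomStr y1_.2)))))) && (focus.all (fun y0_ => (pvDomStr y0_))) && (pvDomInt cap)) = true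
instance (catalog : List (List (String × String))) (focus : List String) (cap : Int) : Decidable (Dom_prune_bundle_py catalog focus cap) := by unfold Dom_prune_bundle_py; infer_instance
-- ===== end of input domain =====

-- B replaces A's partition / sort / concatenate with ONE stable sort of the whole
-- catalog under a sentinel key (objective: simpler).

-- ===== PORT A =====
-- shared helpers (both Pythons compute c.get("name"), the enumerate-dict and order.get(…, dflt))
def pvName (c : List (String × String)) : Option String :=
  PySem.Dict.get? (PySem.Dict.mk c) "name"

def pvOrder (focus : List String) : PySem.Dict String Int :=
  (PySem.List.enumerate focus).foldl (fun d p => d.insert p.2 p.1) PySem.Dict.empty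

def pvKey (order : PySem.Dict String Int) (dflt : Int) (c : List (String × String)) : Int :=
  match pvName c with
  | some n => order.getD n dflt
  | none => dflt

def pvInFocus (focus : List String) (c : List (String × String)) : Bool :=
  match pvName c with
  | some n => focus.contains n
  | none => false

def prune_bundle_py (catalog : List (List (String × String))) (focus : List String) (cap : Int) : List (List (String × String)) :=
  if catalog.isEmpty then []
  else if !focus.isEmpty then
    let order := pvOrder focus
    let pri := catalog.filter (fun c => pvInFocus focus c)
    let priSorted := PySem.List.sorted pri (pvKey order (order.size : Int))
    let rest := catalog.filter (fun c => !pvInFocus focus c)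
    PySem.List.slice (priSorted ++ rest) none (some cap)
  else
    PySem.List.slice catalog none (some cap)

-- ===== PORT B =====
def prune_bundle_py_alt (catalog : List (List (String × String))) (focus : List String) (cap : Int) : List (List (String × String)) :=
  let order := pvOrder focus
  let sentinel : Int := (focus.length : Int)
  PySem.List.slice (PySem.List.sorted catalog (pvKey order sentinel)) none (some cap)

-- ===== PRECONDITION & SPEC =====
def Spec_prune_bundle_py (catalog : List (List (String × String))) (focus : List String) (cap : Int) (out : List (List (String × String))) : Prop := out = prune_bundle_py_alt catalog focus cap
instance (catalog : List (List (String × String))) (focus : List String) (cap : Int) (out : List (List (String × String))) : Decidable (Spec_prune_bundle_py catalog focus cap out) := by unfold Spec_prune_bundle_py; infer_instance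

-- ===== CLAIM (what is proved, stated in full; the proofs are below) =====
def Claim_equal_prune_bundle_py : Prop := ∀ (catalog : List (List (String × String))) (focus : List String) (cap : Int), Dom_prune_bundle_py catalog focus cap → Spec_prune_bundle_py catalog focus cap (prune_bundle_py catalog focus cap)

-- ===== LEMMAS AND PROOFS =====

-- enumerate(focus) carries indices below len(focus)
lemma pv_enumerate_fst_lt {α : Type} : ∀ (xs : List α) (s : Int), ∀ p ∈ PySem.List.enumerate xs s, p.1 < s + xs.length := by
  intro xs
  induction xs with
  | nil => intro s p hp; simp [PySem.List.enumerate] at hp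
  | cons x t ih =>
    intro s p hp
    simp only [PySem.List.enumerate, List.mem_cons] at hp
    rcases hp with h | h
    · subst h; simp only [List.length_cons]; push_cast; omega
    · have := ih (s + 1) p h; simp at *; omega

lemma pv_enumerate_map_snd {α : Type} : ∀ (xs : List α) (s : Int), (PySem.List.enumerate xs s).map (·.2) = xs := by
  intro xs
  induction xs with
  | nil => intro s; simp [PySem.List.enumerate]
  | cons x t ih => intro s; simp [PySem.List.enumerate, ih]

-- every value stored in the order dict is < len(focus)
lemma pv_foldl_insert_get?_lt (B : Int) : ∀ (l : List (Int × String)) (d : PySem.Dict String Int),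
    (∀ n v, d.get? n = some v → v < B) → (∀ p ∈ l, p.1 < B) →
    ∀ n v, (l.foldl (fun d p => d.insert p.2 p.1) d).get? n = some v → v < B := by
  intro l
  induction l with
  | nil => intro d hd _ n v h; exact hd n v h
  | cons p t ih =>
    intro d hd hl n v h
    refine ih (d.insert p.2 p.1) ?_ (fun q hq => hl q (List.mem_cons_of_mem _ hq)) n v h
    intro n' v' h'
    rw [PySem.Dict.get?_insert] at h'
    by_cases hn : n' = p.2
    · simp [hn] at h'; subst h'; exact hl p (List.mem_cons_self ..)
    · simp [hn] at h'; exact hd n' v' h'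

lemma pvOrder_get?_lt (focus : List String) (n : String) (v : Int)
    (h : (pvOrder focus).get? n = some v) : v < (focus.length : Int) := by
  refine pv_foldl_insert_get?_lt (focus.length : Int) (PySem.List.enumerate focus) PySem.Dict.empty ?_ ?_ n v h
  · intro n' v' h'; simp [PySem.Dict.get?_empty] at h'
  · intro p hp; have := pv_enumerate_fst_lt focus 0 p hp; omega

-- the order dict contains exactly the focus names
lemma pvOrder_contains (focus : List String) (n : String) :
    ((pvOrder focus).get? n ≠ none) ↔ n ∈ focus := by
  rw [Ne, PySem.Dict.get?_eq_none_iff_not_mem_keys, not_not]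
  unfold pvOrder
  have hkeys := PySem.Dict.keys_foldl_insert_key (ν := Int) (PySem.List.enumerate focus)
    (fun p => p.2) (fun _ p => p.1) PySem.Dict.empty
  simp only at hkeys
  rw [hkeys, pv_enumerate_map_snd]
  simp [PySem.Dict.keys_empty, PySem.Set.update, ← PySem.Set.ofList_eq_foldl, PySem.Set.mem_ofList]

-- B's key is bounded by the sentinel
lemma pvKeyB_le (focus : List String) (c : List (String × String)) :
    pvKey (pvOrder focus) (focus.length : Int) c ≤ (focus.length : Int) := by
  unfold pvKey
  cases hn : pvName c with
  | none => simp
  | some n =>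
    simp only [PySem.Dict.getD_eq_get?_getD]
    cases hg : (pvOrder focus).get? n with
    | none => simp
    | some v => simpa using le_of_lt (pvOrder_get?_lt focus n v hg)

-- B's key is strictly below the sentinel exactly on the focus items
lemma pvKeyB_lt_iff (focus : List String) (c : List (String × String)) :
    (pvKey (pvOrder focus) (focus.length : Int) c < (focus.length : Int)) ↔ pvInFocus focus c = true := by
  unfold pvKey pvInFocus
  cases hn : pvName c with
  | none => simp
  | some n =>
    simp only [PySem.Dict.getD_eq_get?_getD, List.contains_eq_mem, decide_eq_true_eq]
    rw [← pvOrder_contains]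
    cases hg : (pvOrder focus).get? n with
    | none => simp
    | some v => simpa using pvOrder_get?_lt focus n v hg

-- on focus items A's key (default len(order)) and B's key (default len(focus)) agree
lemma pvKey_agree (focus : List String) (c : List (String × String)) (h : pvInFocus focus c = true) :
    pvKey (pvOrder focus) (((pvOrder focus).size : Nat) : Int) c = pvKey (pvOrder focus) (focus.length : Int) c := by
  unfold pvKey
  unfold pvInFocus at h
  cases hn : pvName c with
  | none => rw [hn] at h; simp at h
  | some n =>
    rw [hn] at h
    simp only [List.contains_eq_mem, decide_eq_true_eq] at h
    rw [← pvOrder_contains] at h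
    cases hg : (pvOrder focus).get? n with
    | none => exact absurd hg h
    | some v => simp [PySem.Dict.getD_eq_get?_getD, hg]

-- inserting x into s ++ t drops straight through t when x sorts before all of t
lemma pv_insertBy_append {α : Type} (before : α → α → Bool) (x : α) :
    ∀ (s t : List α), (∀ y ∈ t, before x y = true) →
    PySem.List.insertBy before x (s ++ t) = PySem.List.insertBy before x s ++ t := by
  intro s
  induction s with
  | nil =>
    intro t ht
    cases t with
    | nil => simp
    | cons y t' => simp [PySem.List.insertBy, ht y (List.mem_cons_self ..)]
  | cons a s' ih =>
    intro t ht
    by_cases hb : before x a = true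
    · simp [PySem.List.insertBy, hb]
    · simp only [Bool.not_eq_true] at hb
      simp [PySem.List.insertBy, hb, ih t ht]

-- the stable insertion sort of a two-valued-key mix splits: low keys get sorted in
-- front, sentinel keys accumulate behind in input order
lemma pv_foldl_ins_split {α : Type} (k : α → Int) (N : Int) :
    ∀ (xs s t : List α), (∀ y ∈ s, k y ≤ N) → (∀ y ∈ t, k y = N) → (∀ x ∈ xs, k x ≤ N) →
    xs.foldl (fun acc x => PySem.List.insertBy (fun a b => decide (k a < k b)) x acc) (s ++ t) =
      (xs.filter (fun x => decide (k x < N))).foldl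
        (fun acc x => PySem.List.insertBy (fun a b => decide (k a < k b)) x acc) s
      ++ (t ++ xs.filter (fun x => !decide (k x < N))) := by
  intro xs
  induction xs with
  | nil => intro s t _ _ _; simp
  | cons x xs' ih =>
    intro s t hs ht hxs
    by_cases hx : k x < N
    · have hstep : PySem.List.insertBy (fun a b => decide (k a < k b)) x (s ++ t) =
          PySem.List.insertBy (fun a b => decide (k a < k b)) x s ++ t := by
        refine pv_insertBy_append _ x s t ?_
        intro y hy; simp [ht y hy, hx]
      have hs' : ∀ y ∈ PySem.List.insertBy (fun a b => decide (k a < k b)) x s, k y ≤ N := by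
        intro y hy
        rcases (PySem.List.mem_insertBy _ x y s).mp hy with rfl | hy'
        · exact le_of_lt hx
        · exact hs y hy'
      simp only [List.foldl_cons, hstep]
      rw [ih _ t hs' ht (fun z hz => hxs z (List.mem_cons_of_mem _ hz))]
      simp [hx]
    · have hxN : k x = N := le_antisymm (hxs x (List.mem_cons_self ..)) (by omega)
      have hstep : PySem.List.insertBy (fun a b => decide (k a < k b)) x (s ++ t) =
          s ++ (t ++ [x]) := by
        rw [← List.append_assoc]
        refine PySem.List.insertBy_of_forall_not_before _ x (s ++ t) ?_
        intro y hy
        rcases List.mem_append.mp hy with hy' | hy'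
        · have := hs y hy'; simp; omega
        · have := ht y hy'; simp; omega
      have ht' : ∀ y ∈ t ++ [x], k y = N := by
        intro y hy
        rcases List.mem_append.mp hy with hy' | hy'
        · exact ht y hy'
        · simp at hy'; subst hy'; exact hxN
      simp only [List.foldl_cons, hstep]
      rw [ih s (t ++ [x]) hs ht' (fun z hz => hxs z (List.mem_cons_of_mem _ hz))]
      simp [hx]

-- insertion is determined by the key values on the elements involved
lemma pv_insertBy_congr {α : Type} (k1 k2 : α → Int) (x : α) :
    ∀ (l : List α), k1 x = k2 x → (∀ y ∈ l, k1 y = k2 y) →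
    PySem.List.insertBy (fun a b => decide (k1 a < k1 b)) x l =
      PySem.List.insertBy (fun a b => decide (k2 a < k2 b)) x l := by
  intro l
  induction l with
  | nil => intro _ _; rfl
  | cons y t ih =>
    intro hx hl
    have hy := hl y (List.mem_cons_self ..)
    by_cases hb : k1 x < k1 y
    · simp [PySem.List.insertBy, hb, hx ▸ hy ▸ hb]
    · have hb2 : ¬ k2 x < k2 y := by rw [← hx, ← hy]; exact hb
      simp [PySem.List.insertBy, hb, hb2, ih hx (fun z hz => hl z (List.mem_cons_of_mem _ hz))]

lemma pv_foldl_ins_congr {α : Type} (k1 k2 : α → Int) :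
    ∀ (xs s : List α), (∀ x ∈ xs, k1 x = k2 x) → (∀ y ∈ s, k1 y = k2 y) →
    xs.foldl (fun acc x => PySem.List.insertBy (fun a b => decide (k1 a < k1 b)) x acc) s =
      xs.foldl (fun acc x => PySem.List.insertBy (fun a b => decide (k2 a < k2 b)) x acc) s := by
  intro xs
  induction xs with
  | nil => intro s _ _; rfl
  | cons x xs' ih =>
    intro s hxs hsv
    have hx := hxs x (List.mem_cons_self ..)
    simp only [List.foldl_cons]
    rw [pv_insertBy_congr k1 k2 x s hx hsv]
    refine ih _ (fun z hz => hxs z (List.mem_cons_of_mem _ hz)) ?_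
    intro y hy
    rcases (PySem.List.mem_insertBy _ x y s).mp hy with rfl | hy'
    · exact hx
    · exact hsv y hy'

lemma pv_sorted_congr {α : Type} (xs : List α) (k1 k2 : α → Int) (h : ∀ x ∈ xs, k1 x = k2 x) :
    PySem.List.sorted xs k1 = PySem.List.sorted xs k2 := by
  rw [PySem.List.sorted_eq_foldl_insertBy, PySem.List.sorted_eq_foldl_insertBy]
  exact pv_foldl_ins_congr k1 k2 xs [] h (by simp)

-- the heart: B's single stable sort IS A's (sorted priority) ++ rest
lemma pv_sorted_split (catalog : List (List (String × String))) (focus : List String) :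
    PySem.List.sorted catalog (pvKey (pvOrder focus) (focus.length : Int)) =
      PySem.List.sorted (catalog.filter (fun c => pvInFocus focus c))
        (pvKey (pvOrder focus) (((pvOrder focus).size : Nat) : Int))
      ++ catalog.filter (fun c => !pvInFocus focus c) := by
  rw [PySem.List.sorted_eq_foldl_insertBy]
  have h := pv_foldl_ins_split (pvKey (pvOrder focus) (focus.length : Int)) (focus.length : Int)
    catalog [] [] (by simp) (by simp) (fun x _ => pvKeyB_le focus x)
  simp only [List.nil_append, List.append_nil] at h
  rw [h]
  have hfilt : catalog.filter (fun x => decide (pvKey (pvOrder focus) (focus.length : Int) x < (focus.length : Int)))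
      = catalog.filter (fun c => pvInFocus focus c) := by
    refine List.filter_congr ?_
    intro x _; simp [pvKeyB_lt_iff]
  have hfilt2 : catalog.filter (fun x => !decide (pvKey (pvOrder focus) (focus.length : Int) x < (focus.length : Int)))
      = catalog.filter (fun c => !pvInFocus focus c) := by
    refine List.filter_congr ?_
    intro x _; simp [pvKeyB_lt_iff]
  rw [hfilt, hfilt2]
  rw [← PySem.List.sorted_eq_foldl_insertBy]
  congr 1
  refine pv_sorted_congr _ _ _ ?_
  intro x hx
  exact (pvKey_agree focus x (by simpa using (List.mem_filter.mp hx).2)).symm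

-- with no focus list every key is the sentinel 0 and the stable sort is the identity
lemma pv_sorted_focus_nil (catalog : List (List (String × String))) :
    PySem.List.sorted catalog (pvKey (pvOrder []) (0 : Int)) = catalog := by
  refine PySem.List.sorted_eq_self_of_pairwise _ _ ?_
  have hk : ∀ c, pvKey (pvOrder []) (0 : Int) c = 0 := by
    intro c
    unfold pvKey pvOrder
    cases pvName c with
    | none => simp
    | some n => simp [PySem.List.enumerate, PySem.Dict.getD_eq_get?_getD, PySem.Dict.get?_empty]
  refine List.pairwise_iff_forall_sublist.mpr ?_
  intro a b _; simp [hk]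

-- ===== VERDICT (by name: the statement is the Claim_ definition above) =====
theorem prune_bundle_py_spec : Claim_equal_prune_bundle_py := by
  intro catalog focus cap _
  unfold Spec_prune_bundle_py prune_bundle_py prune_bundle_py_alt
  by_cases hc : catalog.isEmpty
  · rw [List.isEmpty_iff] at hc
    subst hc
    simp [PySem.List.sorted, PySem.List.slice]
  · simp only [hc, Bool.false_eq_true, if_false]
    by_cases hf : focus.isEmpty
    · rw [List.isEmpty_iff] at hf
      subst hf
      simp only [List.isEmpty_nil, Bool.not_true, Bool.false_eq_true, if_false]
      rw [show ((([] : List String).length : Nat) : Int) = (0 : Int) by simp,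
          pv_sorted_focus_nil]
    · simp only [hf, Bool.not_false, if_true]
      rw [pv_sorted_split catalog focus]
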